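-- pv_equiv track=rewrite | github.com/AlexTruee/python_test | names.py | super_names
-- ===== SOURCE A (Python) =====
-- def super_names(mentors, courses):
--     mentors_names = []
--     for m in mentors:
--         course_names = []
--         for name in m:
--             course_names.append(name.split()[0])
--         mentors_names.append(course_names)
--
--     pairs = []
--     for id1 in range(len(mentors_names)):
--         for id2 in range(len(mentors_names)):
--             if id2 == id1:
--                 continue
--
--             intersection_set = set(mentors_names[id1]) & set(mentors_names[id2])
--             if len(intersection_set) > 0:
--                 pair = {courses[id1], courses[id2]}
--                 if pair not in pairs:
--                     pairs.append(pair)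
--                     all_names_sorted = sorted(intersection_set)
--                     return f"На курсах {courses[id1]} и {courses[id2]} преподают: {', '.join(all_names_sorted)}"
-- ===== SOURCE B (Python) =====
-- def super_names(mentors, courses):
--     # Inverted index: first name -> increasing list of distinct mentor ids.
--     firsts = [[name.split()[0] for name in m] for m in mentors]
--     owners = {}
--     for i, fs in enumerate(firsts):
--         for f in fs:
--             ids = owners.setdefault(f, [])
--             if not ids or ids[-1] != i:
--                 ids.append(i)
--     # id1 = smallest id appearing in a group of >= 2 ids
--     id1 = None
--     for ids in owners.values():
--         if len(ids) >= 2 and (id1 is None or ids[0] < id1):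
--             id1 = ids[0]
--     if id1 is None:
--         return None
--     # id2 = smallest partner of id1 (all partners are > id1 by minimality of id1)
--     id2 = None
--     for ids in owners.values():
--         if id1 in ids:
--             for j in ids:
--                 if j != id1 and (id2 is None or j < id2):
--                     id2 = j
--     shared = sorted(set(firsts[id1]) & set(firsts[id2]))
--     return f"На курсах {courses[id1]} и {courses[id2]} преподают: {', '.join(shared)}"
-- ===== Notes on version B (the rewrite author's own statement) =====
-- stated objective: alternative
-- what changed: Replaces A's all-pairs set-intersection scan (quadratic in the number of mentors in the worst case) by a single-pass inverted index (first name -> increasing list of mentor ids) from which the earliest colliding pair (smallest id1, then its smallest partner) is read off; A's early exit makes A faster on collision-heavy inputs, so no speed is claimed.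
import Mathlib
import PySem

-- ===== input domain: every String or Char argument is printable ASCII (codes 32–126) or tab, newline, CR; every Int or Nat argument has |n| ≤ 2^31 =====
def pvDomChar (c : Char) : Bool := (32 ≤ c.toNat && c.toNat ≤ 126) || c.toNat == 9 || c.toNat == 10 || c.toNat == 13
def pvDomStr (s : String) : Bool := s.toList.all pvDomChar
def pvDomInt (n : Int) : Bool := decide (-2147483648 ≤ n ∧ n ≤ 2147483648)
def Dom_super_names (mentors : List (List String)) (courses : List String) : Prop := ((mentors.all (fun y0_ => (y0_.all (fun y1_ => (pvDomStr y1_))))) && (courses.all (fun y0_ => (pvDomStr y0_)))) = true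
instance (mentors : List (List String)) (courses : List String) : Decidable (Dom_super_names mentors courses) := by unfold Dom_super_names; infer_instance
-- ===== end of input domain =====

-- B replaces A's quadratic all-pairs set-intersection scan by an inverted index
-- (first name -> list of mentor ids) from which the earliest colliding pair is read off.

-- shared helpers (both Pythons compute name.split()[0], the intersection and the message the same way)
-- name.split()[0]; split() = [] is a Python IndexError, excluded by Pre_ (the port returns "" there)
def pvFirst (s : String) : String := (PySem.Str.split₀ s).headD ""

-- set(a) & set(b)
def pvInter (a b : List String) : PySem.Set String :=
  PySem.Set.inter (PySem.Set.ofList a) (PySem.Set.ofList b)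

-- the f-string; built with PySem.Str.join (kernel-transparent), not String.append
def pvMsg (c1 c2 : String) (ns : List String) : String :=
  PySem.Str.join "" ["На курсах ", c1, " и ", c2, " преподают: ", PySem.Str.join ", " ns]

-- ===== PORT A =====
-- inner 'for id2 in range(..)' loop; `pairs` is threaded (it is only appended to on the returning path).
-- courses[idx] out of range is a Python IndexError, excluded by Pre_ (the port reads "" there).
def pvAInner (names : List (List String)) (courses : List String)
    (pairs : List (PySem.Set String)) (id1 : Nat) : List Nat → Option String
  | [] => none
  | id2 :: rest =>
    if id2 = id1 then pvAInner names courses pairs id1 rest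
    else
      let inter := pvInter (names.getD id1 []) (names.getD id2 [])
      if 0 < inter.length then
        let pair := PySem.Set.ofList [courses.getD id1 "", courses.getD id2 ""]
        if pairs.any (fun p => PySem.Set.equal p pair) then pvAInner names courses pairs id1 rest
        else some (pvMsg (courses.getD id1 "") (courses.getD id2 "")
               (PySem.List.sorted inter (fun x => x) false))
      else pvAInner names courses pairs id1 rest

-- outer 'for id1 in range(..)' loop
def pvAOuter (names : List (List String)) (courses : List String)
    (pairs : List (PySem.Set String)) : List Nat → Option String
  | [] => none
  | id1 :: rest =>
    match pvAInner names courses pairs id1 (List.range names.length) with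
    | some r => some r
    | none => pvAOuter names courses pairs rest

def super_names (mentors : List (List String)) (courses : List String) : Option String :=
  let mentors_names := mentors.foldl
    (fun acc m => acc ++ [m.foldl (fun cn s => cn ++ [pvFirst s]) []]) []
  pvAOuter mentors_names courses [] (List.range mentors_names.length)

-- ===== PORT B =====
-- one row of the index build: 'ids = owners.setdefault(f, []); if not ids or ids[-1] != i: ids.append(i)'
def pvRow (i : Nat) (fs : List String) (d : PySem.Dict String (List Nat)) :
    PySem.Dict String (List Nat) :=
  fs.foldl (fun d f =>
    let ids := d.getD f []
    if ids.getLast? = some i then d else d.insert f (ids ++ [i])) d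

-- 'for i, fs in enumerate(firsts): …'
def pvBuild : List (List String) → Nat → PySem.Dict String (List Nat) → PySem.Dict String (List Nat)
  | [], _, d => d
  | fs :: rest, i, d => pvBuild rest (i + 1) (pvRow i fs d)

-- 'id1 = None; for ids in owners.values(): if len(ids) >= 2 and (id1 is None or ids[0] < id1): id1 = ids[0]'
def pvMin1 (vals : List (List Nat)) : Option Nat :=
  vals.foldl (fun best ids =>
    if decide (2 ≤ ids.length) && best.all (fun b => decide (ids.headD 0 < b))
    then some (ids.headD 0) else best) none

-- 'id2 = None; for ids in owners.values(): if id1 in ids: for j in ids: if j != id1 and (id2 is None or j < id2): id2 = j'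
def pvMin2 (i1 : Nat) (vals : List (List Nat)) : Option Nat :=
  vals.foldl (fun best ids =>
    if ids.contains i1 then
      ids.foldl (fun best j =>
        if !(j == i1) && best.all (fun b => decide (j < b)) then some j else best) best
    else best) none

def super_names_alt (mentors : List (List String)) (courses : List String) : Option String :=
  let firsts := mentors.map (fun m => m.map pvFirst)
  let owners := pvBuild firsts 0 PySem.Dict.empty
  match pvMin1 owners.values with
  | none => none
  | some i1 =>
    match pvMin2 i1 owners.values with
    | none => none  -- unreachable: pvMin1 found a group of ≥ 2 ids containing a partner for i1
    | some i2 =>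
      some (pvMsg (courses.getD i1 "") (courses.getD i2 "")
        (PySem.List.sorted (pvInter (firsts.getD i1 []) (firsts.getD i2 [])) (fun x => x) false))

-- ===== PRECONDITION & SPEC =====
-- row i and row j (first names) share a name
def pvShare (g : List (List String)) (i j : Nat) : Bool :=
  (g.getD i []).any (fun f => (g.getD j []).contains f)

-- Pre_ excludes exactly the inputs where Python A raises IndexError, slightly widened: (a) a name whose
-- split() is empty (no non-whitespace character); (b) two distinct mentors share a first name while
-- courses is shorter than mentors (A indexes courses at the colliding pair; the widening — A still
-- returns when the first colliding pair's indices happen to lie inside courses — is cited in claim.json).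
def Pre_super_names (mentors : List (List String)) (courses : List String) : Prop :=
  (∀ m ∈ mentors, ∀ s ∈ m, PySem.Str.split₀ s ≠ []) ∧
  ((∃ i < mentors.length, ∃ j < mentors.length, i ≠ j ∧
      pvShare (mentors.map (fun m => m.map pvFirst)) i j = true) →
    mentors.length ≤ courses.length)

instance (mentors : List (List String)) (courses : List String) :
    Decidable (Pre_super_names mentors courses) := by unfold Pre_super_names; infer_instance

def pvWitness_super_names : List (List String) × List String :=
  ([["Ivan Petrov", "Oleg"], ["Ivan Sidorov"]], ["C1", "C2"])

def Spec_super_names (mentors : List (List String)) (courses : List String) (out : Option String) : Prop := out = super_names_alt mentors courses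
instance (mentors : List (List String)) (courses : List String) (out : Option String) : Decidable (Spec_super_names mentors courses out) := by unfold Spec_super_names; infer_instance

-- ===== CLAIM (what is proved, stated in full; the proofs are below) =====
def Claim_equal_super_names : Prop := ∀ (mentors : List (List String)) (courses : List String), Dom_super_names mentors courses → Pre_super_names mentors courses → Spec_super_names mentors courses (super_names mentors courses)

-- ===== LEMMAS AND PROOFS =====

-- occurrence list: the ids (from k on) of the rows of `rs` that contain f, in increasing order
def pvOcc (f : String) : Nat → List (List String) → List Nat
  | _, [] => []
  | k, r :: rs => (if r.contains f then [k] else []) ++ pvOcc f (k + 1) rs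

theorem pvOcc_mem (f : String) (rs : List (List String)) :
    ∀ (k : Nat) (x : Nat), x ∈ pvOcc f k rs ↔ ∃ t, t < rs.length ∧ x = k + t ∧ f ∈ rs.getD t [] := by
  induction rs with
  | nil => simp [pvOcc]
  | cons r rs ih =>
    intro k x
    constructor
    · intro hx
      have hx' : (f ∈ r ∧ x = k) ∨ x ∈ pvOcc f (k + 1) rs := by simpa [pvOcc] using hx
      rcases hx' with ⟨hc, rfl⟩ | hx'
      · exact ⟨0, by simp, by omega, by simpa using hc⟩
      · rcases (ih (k + 1) x).mp hx' with ⟨t, ht, hxe, hmem⟩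
        exact ⟨t + 1, by simpa using Nat.succ_lt_succ ht, by omega, by simpa using hmem⟩
    · rintro ⟨t, ht, rfl, hmem⟩
      cases t with
      | zero =>
        simp only [List.getD_cons_zero] at hmem
        simp [pvOcc, hmem]
      | succ t =>
        have : k + (t + 1) ∈ pvOcc f (k + 1) rs :=
          (ih (k + 1) (k + (t + 1))).mpr ⟨t, by simpa using Nat.lt_of_succ_lt_succ ht, by omega, by simpa using hmem⟩
        simp [pvOcc, this]

theorem pvOcc_lb (f : String) (rs : List (List String)) (k : Nat) :
    ∀ x ∈ pvOcc f k rs, k ≤ x := by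
  intro x hx
  rcases (pvOcc_mem f rs k x).mp hx with ⟨t, _, rfl, _⟩
  omega

theorem pvOcc_pairwise (f : String) (rs : List (List String)) :
    ∀ k, (pvOcc f k rs).Pairwise (· < ·) := by
  induction rs with
  | nil => intro k; simp [pvOcc]
  | cons r rs ih =>
    intro k
    by_cases hc : f ∈ r
    · have he : pvOcc f k (r :: rs) = k :: pvOcc f (k + 1) rs := by simp [pvOcc, hc]
      rw [he]
      exact List.pairwise_cons.mpr
        ⟨fun x hx => lt_of_lt_of_le (by omega) (pvOcc_lb f rs (k + 1) x hx), ih (k + 1)⟩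
    · have he : pvOcc f k (r :: rs) = pvOcc f (k + 1) rs := by simp [pvOcc, hc]
      rw [he]
      exact ih (k + 1)

-- two distinct members force length ≥ 2
theorem pv_two_le_length {l : List Nat} {i j : Nat} (hij : i ≠ j) (hi : i ∈ l) (hj : j ∈ l) :
    2 ≤ l.length := by
  match l with
  | [] => simp at hi
  | [x] => simp at hi hj; omega
  | x :: y :: rest => simp

-- ---------- the dictionary built by B ----------

theorem pvRow_aux (i : Nat) (d0 : PySem.Dict String (List Nat))
    (h0 : ∀ f ids, d0.get? f = some ids → ids.getLast? ≠ some i) :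
    ∀ (fs : List String) (seen : List String) (d : PySem.Dict String (List Nat)),
      (∀ f, d.get? f = if f ∈ seen then some (d0.getD f [] ++ [i]) else d0.get? f) →
      ∀ f, (fs.foldl (fun d f =>
              if (d.getD f []).getLast? = some i then d else d.insert f (d.getD f [] ++ [i])) d).get? f
          = if f ∈ seen ++ fs then some (d0.getD f [] ++ [i]) else d0.get? f := by
  intro fs
  induction fs with
  | nil => intro seen d hd f; simpa using hd f
  | cons f0 fs ih =>
    intro seen d hd f
    simp only [List.foldl_cons]
    by_cases hs : f0 ∈ seen
    · -- f0 already processed this row: its last entry is i, the step skips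
      have hget : d.get? f0 = some (d0.getD f0 [] ++ [i]) := by rw [hd f0, if_pos hs]
      have hlast : (d.getD f0 []).getLast? = some i := by
        rw [PySem.Dict.getD_of_get?_eq_some d [] hget]; simp
      rw [if_pos hlast]
      have hrec := ih (seen ++ [f0]) d (by
        intro f'
        rw [hd f']
        by_cases hf' : f' = f0
        · subst hf'; rw [if_pos hs, if_pos (by simp)]
        · have : (f' ∈ seen ++ [f0]) ↔ f' ∈ seen := by simp [hf']
          rw [if_congr this rfl rfl]) f
      rw [hrec]
      have : (f ∈ seen ++ [f0] ++ fs) ↔ f ∈ seen ++ f0 :: fs := by simp [or_assoc]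
      rw [if_congr this rfl rfl]
    · -- first time f0 appears in this row: append i
      have hget : d.get? f0 = d0.get? f0 := by rw [hd f0, if_neg hs]
      have hlast : ¬ (d.getD f0 []).getLast? = some i := by
        rw [PySem.Dict.getD_eq_get?_getD, hget]
        cases hg : d0.get? f0 with
        | none => simp
        | some ids => simpa using h0 f0 ids hg
      have hgetD : d.getD f0 [] = d0.getD f0 [] := by
        rw [PySem.Dict.getD_eq_get?_getD, hget, PySem.Dict.getD_eq_get?_getD]
      rw [if_neg hlast, hgetD]
      have hrec := ih (seen ++ [f0]) (d.insert f0 (d0.getD f0 [] ++ [i])) (by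
        intro f'
        by_cases hf' : f' = f0
        · subst hf'; rw [PySem.Dict.get?_insert_self, if_pos (by simp)]
        · rw [PySem.Dict.get?_insert_of_ne _ _ hf', hd f']
          have : (f' ∈ seen ++ [f0]) ↔ f' ∈ seen := by simp [hf']
          rw [if_congr this rfl rfl]) f
      rw [hrec]
      have : (f ∈ seen ++ [f0] ++ fs) ↔ f ∈ seen ++ f0 :: fs := by simp [or_assoc]
      rw [if_congr this rfl rfl]

theorem pvRow_get (i : Nat) (fs : List String) (d0 : PySem.Dict String (List Nat))
    (h0 : ∀ f ids, d0.get? f = some ids → ids.getLast? ≠ some i) (f : String) :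
    (pvRow i fs d0).get? f = if f ∈ fs then some (d0.getD f [] ++ [i]) else d0.get? f := by
  have h := pvRow_aux i d0 h0 fs [] d0 (by intro f'; simp) f
  simpa [pvRow] using h

theorem pvBuild_get (rows : List (List String)) :
    ∀ (k : Nat) (d0 : PySem.Dict String (List Nat)),
      (∀ f ids, d0.get? f = some ids → ids ≠ [] ∧ ∀ x ∈ ids, x < k) →
      ∀ f, (pvBuild rows k d0).get? f =
        match d0.get? f with
        | some ids => some (ids ++ pvOcc f k rows)
        | none => if pvOcc f k rows = [] then none else some (pvOcc f k rows) := by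
  induction rows with
  | nil =>
    intro k d0 _ f
    cases hg : d0.get? f <;> simp [pvBuild, pvOcc, hg]
  | cons r rs ih =>
    intro k d0 h0 f
    have hrow : ∀ f ids, d0.get? f = some ids → ids.getLast? ≠ some k := by
      intro f ids hg hlast
      rcases h0 f ids hg with ⟨hne, hlt⟩
      exact absurd (hlt k (List.mem_of_getLast? hlast)) (by omega)
    have h0' : ∀ f ids, (pvRow k r d0).get? f = some ids → ids ≠ [] ∧ ∀ x ∈ ids, x < k + 1 := by
      intro f' ids hg
      rw [pvRow_get k r d0 hrow f'] at hg
      by_cases hc : f' ∈ r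
      · rw [if_pos hc] at hg
        cases hg
        refine ⟨by simp, ?_⟩
        intro x hx
        rcases List.mem_append.mp hx with hx | hx
        · rw [PySem.Dict.getD_eq_get?_getD] at hx
          cases hgg : d0.get? f' with
          | none => rw [hgg] at hx; simp at hx
          | some ids0 =>
            rw [hgg] at hx
            exact lt_of_lt_of_le ((h0 f' ids0 hgg).2 x (by simpa using hx)) (by omega)
        · simp at hx; omega
      · rw [if_neg hc] at hg
        rcases h0 f' ids hg with ⟨hne, hlt⟩
        exact ⟨hne, fun x hx => lt_of_lt_of_le (hlt x hx) (by omega)⟩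
    rw [show pvBuild (r :: rs) k d0 = pvBuild rs (k + 1) (pvRow k r d0) from rfl]
    rw [ih (k + 1) (pvRow k r d0) h0' f]
    rw [pvRow_get k r d0 hrow f]
    by_cases hc : f ∈ r
    · have hocc : pvOcc f k (r :: rs) = k :: pvOcc f (k + 1) rs := by simp [pvOcc, hc]
      rw [if_pos hc, hocc]
      cases hg : d0.get? f with
      | none =>
        rw [PySem.Dict.getD_eq_get?_getD, hg]
        simp
      | some ids =>
        rw [PySem.Dict.getD_eq_get?_getD, hg]
        simp
    · have hocc : pvOcc f k (r :: rs) = pvOcc f (k + 1) rs := by simp [pvOcc, hc]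
      rw [if_neg hc, hocc]

theorem pvOwners_get (g : List (List String)) (f : String) :
    (pvBuild g 0 PySem.Dict.empty).get? f =
      if pvOcc f 0 g = [] then none else some (pvOcc f 0 g) := by
  have := pvBuild_get g 0 PySem.Dict.empty (by intro f ids h; rw [PySem.Dict.get?_empty] at h; cases h) f
  rw [this, PySem.Dict.get?_empty]

-- keys stay Nodup through the build
theorem pvRow_keys_nodup (i : Nat) :
    ∀ (fs : List String) (d : PySem.Dict String (List Nat)), d.keys.Nodup → (pvRow i fs d).keys.Nodup := by
  intro fs
  induction fs with
  | nil => intro d hd; simpa [pvRow] using hd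
  | cons f fs ih =>
    intro d hd
    have he : pvRow i (f :: fs) d
        = pvRow i fs ((fun (d : PySem.Dict String (List Nat)) f =>
            let ids := d.getD f []
            if ids.getLast? = some i then d else d.insert f (ids ++ [i])) d f) := rfl
    rw [he]
    apply ih
    show (if (d.getD f []).getLast? = some i then d else d.insert f (d.getD f [] ++ [i])).keys.Nodup
    by_cases hl : (d.getD f []).getLast? = some i
    · rw [if_pos hl]; exact hd
    · rw [if_neg hl]; exact PySem.Dict.nodup_keys_insert _ _ _ hd

theorem pvBuild_keys_nodup (rows : List (List String)) :
    ∀ (k : Nat) (d : PySem.Dict String (List Nat)), d.keys.Nodup → (pvBuild rows k d).keys.Nodup := by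
  induction rows with
  | nil => intro k d hd; simpa [pvBuild] using hd
  | cons r rs ih => intro k d hd; exact ih (k + 1) _ (pvRow_keys_nodup k r d hd)

theorem pvVals_mem (g : List (List String)) (ids : List Nat) :
    ids ∈ (pvBuild g 0 PySem.Dict.empty).values ↔ ∃ f, pvOcc f 0 g ≠ [] ∧ ids = pvOcc f 0 g := by
  constructor
  · intro h
    have hnd : (pvBuild g 0 PySem.Dict.empty).keys.Nodup :=
      pvBuild_keys_nodup g 0 PySem.Dict.empty (by simp [PySem.Dict.keys_empty])
    rcases List.mem_map.mp h with ⟨⟨f, v⟩, hmem, hv⟩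
    have hget : (pvBuild g 0 PySem.Dict.empty).get? f = some v :=
      PySem.Dict.get?_of_mem_items _ hmem hnd
    rw [pvOwners_get g f] at hget
    by_cases hocc : pvOcc f 0 g = []
    · simp [hocc] at hget
    · rw [if_neg hocc] at hget
      exact ⟨f, hocc, by cases hget; simpa using hv.symm⟩
  · rintro ⟨f, hocc, rfl⟩
    have hget : (pvBuild g 0 PySem.Dict.empty).get? f = some (pvOcc f 0 g) := by
      rw [pvOwners_get g f, if_neg hocc]
    exact List.mem_map.mpr ⟨(f, pvOcc f 0 g), PySem.Dict.mem_items_of_get?_eq_some _ hget, rfl⟩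

-- ---------- min folds ----------

def pvOMin (l : List Nat) (acc : Option Nat) : Option Nat :=
  l.foldl (fun best h => match best with | none => some h | some b => some (min b h)) acc

theorem pvOMin_append (a b : List Nat) (acc : Option Nat) :
    pvOMin (a ++ b) acc = pvOMin b (pvOMin a acc) := by
  simp [pvOMin, List.foldl_append]

theorem pvOMin_spec (l : List Nat) :
    ∀ acc : Option Nat,
      (pvOMin l acc = none ↔ acc = none ∧ l = []) ∧
      (∀ x, pvOMin l acc = some x →
        (x ∈ l ∨ acc = some x) ∧ (∀ y ∈ l, x ≤ y) ∧ (∀ b, acc = some b → x ≤ b)) := by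
  induction l with
  | nil => intro acc; constructor
           · simp [pvOMin]
           · intro x hx; simp [pvOMin] at hx; subst hx; exact ⟨Or.inr rfl, by simp, by simp⟩
  | cons h t ih =>
    intro acc
    have step : pvOMin (h :: t) acc = pvOMin t (match acc with | none => some h | some b => some (min b h)) := rfl
    constructor
    · rw [step]
      cases acc with
      | none => simp [(ih (some h)).1]
      | some b => simp [(ih (some (min b h))).1]
    · intro x hx
      rw [step] at hx
      cases acc with
      | none =>
        rcases (ih (some h)).2 x hx with ⟨hmem, hle, hacc⟩
        have hxh : x ≤ h := hacc _ rfl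
        refine ⟨Or.inl ?_, ?_, by simp⟩
        · rcases hmem with hm | hm
          · exact List.mem_cons_of_mem _ hm
          · have : h = x := by injection hm
            rw [← this]; exact List.mem_cons_self
        · intro y hy
          rcases List.mem_cons.mp hy with rfl | hy
          · exact hxh
          · exact hle y hy
      | some b =>
        rcases (ih (some (min b h))).2 x hx with ⟨hmem, hle, hacc⟩
        have hxbh : x ≤ min b h := hacc _ rfl
        have hxb : x ≤ b := le_trans hxbh (min_le_left _ _)
        have hxh : x ≤ h := le_trans hxbh (min_le_right _ _)
        refine ⟨?_, ?_, ?_⟩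
        · rcases hmem with hm | hm
          · exact Or.inl (List.mem_cons_of_mem _ hm)
          · have hmx : min b h = x := by injection hm
            rcases min_choice b h with hc | hc
            · exact Or.inr (by rw [← hmx, hc])
            · exact Or.inl (by rw [← hmx, hc]; exact List.mem_cons_self)
        · intro y hy
          rcases List.mem_cons.mp hy with rfl | hy
          · exact hxh
          · exact hle y hy
        · intro c hc
          cases hc; exact hxb

theorem pvOMin_cons (h : Nat) (l : List Nat) (acc : Option Nat) :
    pvOMin (h :: l) acc = pvOMin l (match acc with | none => some h | some b => some (min b h)) := rfl

theorem pvMin1_eq_omin (vals : List (List Nat)) :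
    pvMin1 vals = pvOMin ((vals.filter (fun ids => decide (2 ≤ ids.length))).map (fun ids => ids.headD 0)) none := by
  suffices h : ∀ acc : Option Nat,
      vals.foldl (fun best ids =>
        if decide (2 ≤ ids.length) && best.all (fun b => decide (ids.headD 0 < b))
        then some (ids.headD 0) else best) acc
      = pvOMin ((vals.filter (fun ids => decide (2 ≤ ids.length))).map (fun ids => ids.headD 0)) acc by
    exact h none
  induction vals with
  | nil => intro acc; simp [pvOMin]
  | cons ids t ih =>
    intro acc
    rw [List.foldl_cons]
    by_cases hlen : 2 ≤ ids.length
    · have hd : decide (2 ≤ ids.length) = true := by simpa using hlen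
      have hfil : (ids :: t).filter (fun ids => decide (2 ≤ ids.length))
          = ids :: t.filter (fun ids => decide (2 ≤ ids.length)) := by
        rw [List.filter_cons, if_pos hd]
      have hstep : (if decide (2 ≤ ids.length) && acc.all (fun b => decide (ids.headD 0 < b))
            then some (ids.headD 0) else acc)
          = match acc with | none => some (ids.headD 0) | some b => some (min b (ids.headD 0)) := by
        cases acc with
        | none => simp [hd]
        | some b =>
          show _ = some (min b (ids.headD 0))
          by_cases hlt : ids.headD 0 < b
          · rw [show min b (ids.headD 0) = ids.headD 0 from by omega]
            simp [hd, hlt]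
            simp only [List.headD_eq_head?_getD] at hlt
            omega
          · rw [show min b (ids.headD 0) = b from by omega]
            simp [hd, hlt]
            simp only [List.headD_eq_head?_getD] at hlt
            omega
      rw [hstep, ih, hfil, List.map_cons, pvOMin_cons]
    · have hd : decide (2 ≤ ids.length) = false := by simpa using hlen
      have hfil : (ids :: t).filter (fun ids => decide (2 ≤ ids.length))
          = t.filter (fun ids => decide (2 ≤ ids.length)) := by
        rw [List.filter_cons, if_neg (by simp [hd])]
      have hstep : (if decide (2 ≤ ids.length) && acc.all (fun b => decide (ids.headD 0 < b))
            then some (ids.headD 0) else acc) = acc := by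
        rw [hd]
        simp
      rw [hstep, ih, hfil]

theorem pvMin2_inner_eq (i1 : Nat) :
    ∀ (ids : List Nat) (acc : Option Nat),
      ids.foldl (fun best j =>
        if !(j == i1) && best.all (fun b => decide (j < b)) then some j else best) acc
      = pvOMin (ids.filter (fun j => !(j == i1))) acc := by
  intro ids
  induction ids with
  | nil => intro acc; simp [pvOMin]
  | cons j t ih =>
    intro acc
    rw [List.foldl_cons]
    by_cases hj : j = i1
    · have hb : (!(j == i1)) = false := by simp [hj]
      have hfil : (j :: t).filter (fun j => !(j == i1)) = t.filter (fun j => !(j == i1)) := by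
        rw [List.filter_cons, if_neg (by simp [hb])]
      have hstep : (if !(j == i1) && acc.all (fun b => decide (j < b)) then some j else acc) = acc := by
        rw [hb]
        simp
      rw [hstep, ih, hfil]
    · have hb : (!(j == i1)) = true := by simp [hj]
      have hfil : (j :: t).filter (fun j => !(j == i1)) = j :: t.filter (fun j => !(j == i1)) := by
        rw [List.filter_cons, if_pos (by simp [hb])]
      have hstep : (if !(j == i1) && acc.all (fun b => decide (j < b)) then some j else acc)
          = match acc with | none => some j | some b => some (min b j) := by
        cases acc with
        | none => simp [hb]
        | some b =>
          show _ = some (min b j)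
          by_cases hlt : j < b
          · rw [show min b j = j from by omega]
            simp [hb, hlt]
          · rw [show min b j = b from by omega]
            simp [hb, hlt]
      rw [hstep, ih, hfil, pvOMin_cons]

theorem pvMin2_eq_omin (i1 : Nat) (vals : List (List Nat)) :
    pvMin2 i1 vals = pvOMin (((vals.filter (fun ids => ids.contains i1)).flatten).filter (fun j => !(j == i1))) none := by
  suffices h : ∀ acc : Option Nat,
      vals.foldl (fun best ids =>
        if ids.contains i1 then
          ids.foldl (fun best j =>
            if !(j == i1) && best.all (fun b => decide (j < b)) then some j else best) best
        else best) acc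
      = pvOMin (((vals.filter (fun ids => ids.contains i1)).flatten).filter (fun j => !(j == i1))) acc by
    exact h none
  induction vals with
  | nil => intro acc; simp [pvOMin]
  | cons ids t ih =>
    intro acc
    rw [List.foldl_cons]
    by_cases hc : ids.contains i1
    · have hstep : (if ids.contains i1 then
            ids.foldl (fun best j =>
              if !(j == i1) && best.all (fun b => decide (j < b)) then some j else best) acc
          else acc)
          = pvOMin (ids.filter (fun j => !(j == i1))) acc := by
        rw [if_pos hc, pvMin2_inner_eq]
      have hfil : (ids :: t).filter (fun ids => ids.contains i1)
          = ids :: t.filter (fun ids => ids.contains i1) := by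
        rw [List.filter_cons, if_pos hc]
      rw [hstep, ih, hfil, List.flatten_cons, List.filter_append, pvOMin_append]
    · have hstep : (if ids.contains i1 then
            ids.foldl (fun best j =>
              if !(j == i1) && best.all (fun b => decide (j < b)) then some j else best) acc
          else acc) = acc := by
        rw [if_neg hc]
      have hfil : (ids :: t).filter (fun ids => ids.contains i1)
          = t.filter (fun ids => ids.contains i1) := by
        rw [List.filter_cons, if_neg hc]
      rw [hstep, ih, hfil]

-- find? on a strictly sorted list returns the least element satisfying p
theorem pvFind_least (p : Nat → Bool) :
    ∀ l : List Nat, l.Pairwise (· < ·) →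
      ∀ m, (l.find? p = some m ↔ m ∈ l ∧ p m = true ∧ ∀ x ∈ l, p x = true → m ≤ x) := by
  intro l
  induction l with
  | nil => intro _ m; simp
  | cons a t ih =>
    intro hp m
    rcases List.pairwise_cons.mp hp with ⟨ha, ht⟩
    by_cases hpa : p a
    · rw [List.find?_cons_of_pos hpa]
      constructor
      · rintro ⟨rfl⟩
        exact ⟨List.mem_cons_self, hpa, by
          intro x hx _
          rcases List.mem_cons.mp hx with rfl | hx
          · exact le_refl _
          · exact le_of_lt (ha x hx)⟩
      · rintro ⟨hm, hpm, hmin⟩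
        rcases List.mem_cons.mp hm with rfl | hm
        · rfl
        · have h1 : m ≤ a := hmin a List.mem_cons_self hpa
          have h2 : a < m := ha m hm
          omega
    · rw [List.find?_cons_of_neg (by simpa using hpa)]
      rw [ih ht m]
      constructor
      · rintro ⟨hm, hpm, hmin⟩
        exact ⟨List.mem_cons_of_mem _ hm, hpm, by
          intro x hx hpx
          rcases List.mem_cons.mp hx with rfl | hx
          · exact absurd hpx (by simpa using hpa)
          · exact hmin x hx hpx⟩
      · rintro ⟨hm, hpm, hmin⟩
        rcases List.mem_cons.mp hm with rfl | hm
        · exact absurd hpm (by simpa using hpa)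
        · exact ⟨hm, hpm, fun x hx hpx => hmin x (List.mem_cons_of_mem _ hx) hpx⟩

-- ---------- shared facts about rows and sharing ----------

theorem pvShare_iff (g : List (List String)) (i j : Nat) :
    pvShare g i j = true ↔ ∃ f, f ∈ g.getD i [] ∧ f ∈ g.getD j [] := by
  simp [pvShare, List.any_eq_true]

theorem pvInter_pos_iff (a b : List String) :
    (0 < (pvInter a b).length) ↔ a.any (fun f => b.contains f) = true := by
  rw [List.length_pos_iff_exists_mem]
  constructor
  · rintro ⟨x, hx⟩
    rcases (PySem.Set.mem_inter _ _ x).mp hx with ⟨hxa, hxb⟩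
    exact List.any_eq_true.mpr ⟨x, by simpa [PySem.Set.mem_ofList] using hxa,
      by simpa [List.contains_iff_mem, PySem.Set.mem_ofList] using hxb⟩
  · intro h
    rcases List.any_eq_true.mp h with ⟨x, hxa, hxb⟩
    exact ⟨x, (PySem.Set.mem_inter _ _ x).mpr
      ⟨by simpa [PySem.Set.mem_ofList] using hxa,
       by simpa [PySem.Set.mem_ofList, List.contains_iff_mem] using hxb⟩⟩

theorem pvOcc_mem_zero (g : List (List String)) (f : String) (i : Nat) :
    i ∈ pvOcc f 0 g ↔ i < g.length ∧ f ∈ g.getD i [] := by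
  rw [pvOcc_mem f g 0 i]
  constructor
  · rintro ⟨t, ht, rfl, hm⟩; simpa using ⟨ht, hm⟩
  · rintro ⟨hi, hm⟩; exact ⟨i, hi, by omega, hm⟩

-- the shared-name predicate that drives A's outer loop
def pvP (g : List (List String)) (i : Nat) : Bool :=
  (List.range g.length).any (fun j => !(j == i) && pvShare g i j)

theorem pvP_iff (g : List (List String)) (i : Nat) :
    pvP g i = true ↔ ∃ j, j < g.length ∧ j ≠ i ∧ pvShare g i j = true := by
  simp [pvP, List.any_eq_true, List.mem_range]

-- ---------- A's loops, characterised ----------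

theorem pvAInner_cons (g : List (List String)) (c : List String) (pairs : List (PySem.Set String))
    (i j : Nat) (rest : List Nat) :
    pvAInner g c pairs i (j :: rest)
      = if j = i then pvAInner g c pairs i rest
        else
          if 0 < (pvInter (g.getD i []) (g.getD j [])).length then
            if pairs.any (fun p => PySem.Set.equal p (PySem.Set.ofList [c.getD i "", c.getD j ""]))
            then pvAInner g c pairs i rest
            else some (pvMsg (c.getD i "") (c.getD j "")
                   (PySem.List.sorted (pvInter (g.getD i []) (g.getD j [])) (fun x => x) false))
          else pvAInner g c pairs i rest := rfl

theorem pvAInner_eq (g : List (List String)) (c : List String) (i : Nat) (l : List Nat) :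
    pvAInner g c [] i l
      = (l.find? (fun j => !(j == i) && pvShare g i j)).map (fun j =>
          pvMsg (c.getD i "") (c.getD j "")
            (PySem.List.sorted (pvInter (g.getD i []) (g.getD j [])) (fun x => x) false)) := by
  induction l with
  | nil => simp [pvAInner]
  | cons j rest ih =>
    rw [pvAInner_cons]
    by_cases hj : j = i
    · subst hj
      rw [if_pos rfl, ih, List.find?_cons_of_neg (by simp)]
    · rw [if_neg hj]
      by_cases hpos : 0 < (pvInter (g.getD i []) (g.getD j [])).length
      · rw [if_pos hpos, if_neg (by simp)]
        have hsh : pvShare g i j = true := (pvInter_pos_iff _ _).mp hpos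
        rw [List.find?_cons_of_pos (by simp [hj, hsh])]
        rfl
      · have hsh : pvShare g i j = false := by
          rw [← Bool.not_eq_true]
          intro h
          exact hpos ((pvInter_pos_iff _ _).mpr h)
        rw [if_neg hpos, ih, List.find?_cons_of_neg (by simp [hj, hsh])]

theorem pvAOuter_eq (g : List (List String)) (c : List String) (l : List Nat) :
    pvAOuter g c [] l
      = match l.find? (fun i => pvP g i) with
        | none => none
        | some i => ((List.range g.length).find? (fun j => !(j == i) && pvShare g i j)).map (fun j =>
            pvMsg (c.getD i "") (c.getD j "")
              (PySem.List.sorted (pvInter (g.getD i []) (g.getD j [])) (fun x => x) false)) := by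
  induction l with
  | nil => simp [pvAOuter]
  | cons i rest ih =>
    have hcons : pvAOuter g c [] (i :: rest)
        = (match pvAInner g c [] i (List.range g.length) with
           | some r => some r
           | none => pvAOuter g c [] rest) := rfl
    rw [hcons, pvAInner_eq]
    cases hf : (List.range g.length).find? (fun j => !(j == i) && pvShare g i j) with
    | some j =>
      have hex : ∃ x ∈ List.range g.length, (!(x == i) && pvShare g i x) = true :=
        List.find?_isSome.mp (by rw [hf]; rfl)
      have hP : pvP g i = true := by
        unfold pvP
        exact List.any_eq_true.mpr hex
      rw [List.find?_cons_of_pos hP]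
      simp [hf]
    | none =>
      have hP : pvP g i = false := by
        unfold pvP
        exact List.any_eq_false.mpr (fun x hx => by simpa using List.find?_eq_none.mp hf x hx)
      rw [List.find?_cons_of_neg (by simp [hP])]
      exact ih

-- ---------- B's minima, identified with A's scans ----------

theorem pvOcc_headD_le (f : String) (g : List (List String)) {x : Nat} (hx : x ∈ pvOcc f 0 g) :
    (pvOcc f 0 g).headD 0 ≤ x := by
  cases hocc : pvOcc f 0 g with
  | nil => rw [hocc] at hx; simp at hx
  | cons h t =>
    have hp := pvOcc_pairwise f g 0
    rw [hocc] at hp hx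
    rcases List.pairwise_cons.mp hp with ⟨hh, _⟩
    rcases List.mem_cons.mp hx with rfl | hx
    · simp
    · simpa using le_of_lt (hh x hx)

theorem pvC_mem (g : List (List String)) (c : Nat) :
    c ∈ (((pvBuild g 0 PySem.Dict.empty).values.filter (fun ids => decide (2 ≤ ids.length))).map (fun ids => ids.headD 0))
      ↔ ∃ f, 2 ≤ (pvOcc f 0 g).length ∧ c = (pvOcc f 0 g).headD 0 := by
  rw [List.mem_map]
  constructor
  · rintro ⟨ids, hids, rfl⟩
    rcases List.mem_filter.mp hids with ⟨hmem, hlen⟩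
    rcases (pvVals_mem g ids).mp hmem with ⟨f, hocc, rfl⟩
    exact ⟨f, by simpa using hlen, rfl⟩
  · rintro ⟨f, hlen, rfl⟩
    refine ⟨pvOcc f 0 g, List.mem_filter.mpr ⟨(pvVals_mem g _).mpr ⟨f, ?_, rfl⟩, by simpa using hlen⟩, rfl⟩
    intro hnil
    rw [hnil] at hlen
    simp at hlen

-- every element of the candidate list satisfies pvP and is < n
theorem pvC_elem (g : List (List String)) (c : Nat)
    (h : c ∈ (((pvBuild g 0 PySem.Dict.empty).values.filter (fun ids => decide (2 ≤ ids.length))).map (fun ids => ids.headD 0))) :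
    pvP g c = true ∧ c < g.length := by
  rcases (pvC_mem g c).mp h with ⟨f, hlen, rfl⟩
  have hne : pvOcc f 0 g ≠ [] := by intro hnil; rw [hnil] at hlen; simp at hlen
  have hnd : (pvOcc f 0 g).Nodup := (pvOcc_pairwise f g 0).imp (fun h => Nat.ne_of_lt h)
  cases hocc : pvOcc f 0 g with
  | nil => exact absurd hocc hne
  | cons a t =>
    have ht : t ≠ [] := by
      intro h0
      rw [hocc, h0] at hlen
      simp at hlen
    cases t with
    | nil => exact absurd rfl ht
    | cons b t' =>
      have hab : a < b := by
        have := pvOcc_pairwise f g 0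
        rw [hocc] at this
        exact (List.pairwise_cons.mp this).1 b (by simp)
      have ha : a ∈ pvOcc f 0 g := by rw [hocc]; simp
      have hb : b ∈ pvOcc f 0 g := by rw [hocc]; simp
      rcases (pvOcc_mem_zero g f a).mp ha with ⟨han, haf⟩
      rcases (pvOcc_mem_zero g f b).mp hb with ⟨hbn, hbf⟩
      constructor
      · simp only [List.headD_cons]
        exact (pvP_iff g a).mpr ⟨b, hbn, by omega, (pvShare_iff g a b).mpr ⟨f, haf, hbf⟩⟩
      · simpa using han

theorem pvM1 (g : List (List String)) :
    pvMin1 (pvBuild g 0 PySem.Dict.empty).values = (List.range g.length).find? (pvP g) := by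
  rw [pvMin1_eq_omin]
  set C := (((pvBuild g 0 PySem.Dict.empty).values.filter (fun ids => decide (2 ≤ ids.length))).map (fun ids => ids.headD 0)) with hC
  cases hf : (List.range g.length).find? (pvP g) with
  | none =>
    have hnone := List.find?_eq_none.mp hf
    have hCnil : C = [] := by
      rw [List.eq_nil_iff_forall_not_mem]
      intro c hc
      rcases pvC_elem g c hc with ⟨hP, hcn⟩
      exact absurd hP (hnone c (List.mem_range.mpr hcn))
    rw [hCnil]
    simp [pvOMin]
  | some i =>
    rcases (pvFind_least (pvP g) (List.range g.length) (List.pairwise_lt_range) i).mp hf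
      with ⟨hiR, hPi, hmin⟩
    -- produce a candidate ≤ i
    rcases (pvP_iff g i).mp hPi with ⟨j, hjn, hji, hsh⟩
    rcases (pvShare_iff g i j).mp hsh with ⟨f, hfi, hfj⟩
    have hin : i < g.length := List.mem_range.mp hiR
    have hiocc : i ∈ pvOcc f 0 g := (pvOcc_mem_zero g f i).mpr ⟨hin, hfi⟩
    have hjocc : j ∈ pvOcc f 0 g := (pvOcc_mem_zero g f j).mpr ⟨hjn, hfj⟩
    have hlen2 : 2 ≤ (pvOcc f 0 g).length := pv_two_le_length (Ne.symm hji) hiocc hjocc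
    have hcC : (pvOcc f 0 g).headD 0 ∈ C := (pvC_mem g _).mpr ⟨f, hlen2, rfl⟩
    have hcle : (pvOcc f 0 g).headD 0 ≤ i := pvOcc_headD_le f g hiocc
    cases hm : pvOMin C none with
    | none =>
      have := ((pvOMin_spec C none).1).mp hm
      rw [this.2] at hcC
      simp at hcC
    | some x =>
      rcases (pvOMin_spec C none).2 x hm with ⟨hxm, hxle, _⟩
      have hxC : x ∈ C := by
        rcases hxm with h | h
        · exact h
        · simp at h
      rcases pvC_elem g x hxC with ⟨hPx, hxn⟩
      have h1 : i ≤ x := hmin x (List.mem_range.mpr hxn) hPx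
      have h2 : x ≤ i := le_trans (hxle _ hcC) hcle
      rw [show x = i from le_antisymm h2 h1]

theorem pvJ_mem (g : List (List String)) (i j : Nat) (hi : i < g.length) :
    j ∈ ((((pvBuild g 0 PySem.Dict.empty).values.filter (fun ids => ids.contains i)).flatten).filter (fun j => !(j == i)))
      ↔ j ≠ i ∧ j < g.length ∧ pvShare g i j = true := by
  rw [List.mem_filter]
  constructor
  · rintro ⟨hmem, hne⟩
    rcases List.mem_flatten.mp hmem with ⟨ids, hids, hj⟩
    rcases List.mem_filter.mp hids with ⟨hvals, hci⟩
    rcases (pvVals_mem g ids).mp hvals with ⟨f, hocc, rfl⟩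
    have hiocc : i ∈ pvOcc f 0 g := List.contains_iff_mem.mp hci
    rcases (pvOcc_mem_zero g f i).mp hiocc with ⟨_, hfi⟩
    rcases (pvOcc_mem_zero g f j).mp hj with ⟨hjn, hfj⟩
    exact ⟨by simpa using hne, hjn, (pvShare_iff g i j).mpr ⟨f, hfi, hfj⟩⟩
  · rintro ⟨hne, hjn, hsh⟩
    rcases (pvShare_iff g i j).mp hsh with ⟨f, hfi, hfj⟩
    have hiocc : i ∈ pvOcc f 0 g := (pvOcc_mem_zero g f i).mpr ⟨hi, hfi⟩
    have hjocc : j ∈ pvOcc f 0 g := (pvOcc_mem_zero g f j).mpr ⟨hjn, hfj⟩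
    refine ⟨List.mem_flatten.mpr ⟨pvOcc f 0 g, List.mem_filter.mpr ⟨(pvVals_mem g _).mpr ⟨f, ?_, rfl⟩, List.contains_iff_mem.mpr hiocc⟩, hjocc⟩, by simpa using hne⟩
    intro hnil
    rw [hnil] at hiocc
    simp at hiocc

theorem pvM2 (g : List (List String)) (i : Nat) (hi : i < g.length) :
    pvMin2 i (pvBuild g 0 PySem.Dict.empty).values
      = (List.range g.length).find? (fun j => !(j == i) && pvShare g i j) := by
  rw [pvMin2_eq_omin]
  set J := ((((pvBuild g 0 PySem.Dict.empty).values.filter (fun ids => ids.contains i)).flatten).filter (fun j => !(j == i))) with hJ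
  cases hf : (List.range g.length).find? (fun j => !(j == i) && pvShare g i j) with
  | none =>
    have hnone := List.find?_eq_none.mp hf
    have hJnil : J = [] := by
      rw [List.eq_nil_iff_forall_not_mem]
      intro j hj
      rcases (pvJ_mem g i j hi).mp hj with ⟨hne, hjn, hsh⟩
      exact absurd (by simp [hne, hsh] : (!(j == i) && pvShare g i j) = true)
        (hnone j (List.mem_range.mpr hjn))
    rw [hJnil]
    simp [pvOMin]
  | some j =>
    rcases (pvFind_least _ (List.range g.length) (List.pairwise_lt_range) j).mp hf
      with ⟨hjR, hpj, hmin⟩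
    have hjn : j < g.length := List.mem_range.mp hjR
    obtain ⟨hne, hsh⟩ : j ≠ i ∧ pvShare g i j = true := by simpa using hpj
    have hjJ : j ∈ J := (pvJ_mem g i j hi).mpr ⟨hne, hjn, hsh⟩
    cases hm : pvOMin J none with
    | none =>
      have := ((pvOMin_spec J none).1).mp hm
      rw [this.2] at hjJ
      simp at hjJ
    | some x =>
      rcases (pvOMin_spec J none).2 x hm with ⟨hxm, hxle, _⟩
      have hxJ : x ∈ J := by
        rcases hxm with h | h
        · exact h
        · simp at h
      rcases (pvJ_mem g i x hi).mp hxJ with ⟨hxne, hxn, hxsh⟩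
      have h1 : j ≤ x := hmin x (List.mem_range.mpr hxn) (by simp [hxne, hxsh])
      have h2 : x ≤ j := hxle _ hjJ
      rw [show x = j from le_antisymm h2 h1]

-- ---------- main ----------

theorem pv_main (mentors : List (List String)) (courses : List String) :
    super_names mentors courses = super_names_alt mentors courses := by
  have hinner : ∀ m : List String, m.foldl (fun cn s => cn ++ [pvFirst s]) [] = m.map pvFirst :=
    fun m => by simpa using PySem.List.foldl_append_singleton_eq_map pvFirst m []
  have hnames : mentors.foldl (fun acc m => acc ++ [m.foldl (fun cn s => cn ++ [pvFirst s]) []]) []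
      = mentors.map (fun m => m.map pvFirst) := by
    have h1 := PySem.List.foldl_append_singleton_eq_map
      (fun m : List String => m.foldl (fun cn s => cn ++ [pvFirst s]) []) mentors []
    simp only [List.nil_append] at h1
    rw [h1]
    exact List.map_congr_left fun m _ => hinner m
  show pvAOuter _ courses [] _ = _
  rw [hnames]
  set g := mentors.map (fun m => m.map pvFirst) with hg
  rw [pvAOuter_eq]
  show _ = (match pvMin1 (pvBuild g 0 PySem.Dict.empty).values with
    | none => none
    | some i1 =>
      match pvMin2 i1 (pvBuild g 0 PySem.Dict.empty).values with
      | none => none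
      | some i2 =>
        some (pvMsg (courses.getD i1 "") (courses.getD i2 "")
          (PySem.List.sorted (pvInter (g.getD i1 []) (g.getD i2 [])) (fun x => x) false)))
  rw [pvM1]
  cases hf : (List.range g.length).find? (pvP g) with
  | none => rfl
  | some i =>
    have hin : i < g.length := by
      have := List.mem_of_find?_eq_some hf
      exact List.mem_range.mp this
    have h2 := pvM2 g i hin
    cases hf2 : (List.range g.length).find? (fun j => !(j == i) && pvShare g i j) with
    | none =>
      rw [hf2] at h2
      simp only [h2]
      rw [hf2]
      rfl
    | some j =>
      rw [hf2] at h2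
      simp only [h2]
      rw [hf2]
      rfl

-- ===== VERDICT (by name: the statement is the Claim_ definition above) =====
theorem super_names_spec : Claim_equal_super_names := by
  intro mentors courses _ _
  unfold Spec_super_names
  exact pv_main mentors courses
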